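-- pv_equiv track=rewrite | github.com/Attyuttam/CplusplusCodesForCoreCSSubjects | python_tut/ABCheck.py | ABCheck
-- ===== SOURCE A (Python) =====
-- def ABCheck(str):
--     l = int(len(str))
--     i = 0
--     while i<(l-4):
--         if str[i]=='a' and str[i+4]=='b':
--             return "true"
--         i+=1
--     return "false"
-- ===== SOURCE B (Python) =====
-- def ABCheck(str):
--     a_pos = {i for i, c in enumerate(str) if c == 'a'}
--     b_shift = {j - 4 for j, c in enumerate(str) if c == 'b'}
--     return "true" if a_pos & b_shift else "false"
-- ===== Notes on version B (the rewrite author's own statement) =====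
-- stated objective: alternative
-- what changed: Instead of A's while-loop testing str[i] and str[i+4] at each index, B builds two index sets in staged passes (positions of 'a', positions of 'b' shifted left by 4) and answers by whether their intersection is non-empty.
import Mathlib
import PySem

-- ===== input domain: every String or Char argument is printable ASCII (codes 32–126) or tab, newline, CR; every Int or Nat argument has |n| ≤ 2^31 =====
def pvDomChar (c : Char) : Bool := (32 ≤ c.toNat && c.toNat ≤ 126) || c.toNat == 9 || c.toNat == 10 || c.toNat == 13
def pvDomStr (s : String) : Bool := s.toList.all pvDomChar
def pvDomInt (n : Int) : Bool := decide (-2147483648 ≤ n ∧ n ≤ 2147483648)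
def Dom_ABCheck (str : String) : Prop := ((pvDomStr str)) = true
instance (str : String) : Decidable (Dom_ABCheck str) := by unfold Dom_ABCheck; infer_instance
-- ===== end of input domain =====

-- B replaces A's index-arithmetic while-loop by two staged passes building index sets
-- (positions of 'a', positions of 'b' shifted by 4) and intersecting them (alternative, same cost).


-- ===== PORT A =====
-- the while-loop: i increments until i < l - 4 fails, returning early on a match
def ABCheckGo (s : String) (l i : Int) : String :=
  if _h : i < l - 4 then
    if PySem.Str.pyGet? s i = some 'a' ∧ PySem.Str.pyGet? s (i + 4) = some 'b' then "true"
    else ABCheckGo s l (i + 1)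
  else "false"
termination_by (l - 4 - i).toNat
decreasing_by omega

def ABCheck (str : String) : String := ABCheckGo str (PySem.Str.len str) 0

-- ===== PORT B =====
-- a_pos = {i for i, c in enumerate(str) if c == 'a'}; b_shift = {j - 4 for j, c in enumerate(str) if c == 'b'};
-- "true" iff a_pos & b_shift is non-empty
def ABCheck_alt (str : String) : String :=
  let aPos := PySem.Set.ofList
    (((PySem.List.enumerate str.toList 0).filter (fun p => p.2 == 'a')).map (fun p => p.1))
  let bShift := PySem.Set.ofList
    (((PySem.List.enumerate str.toList 0).filter (fun p => p.2 == 'b')).map (fun p => p.1 - 4))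
  if PySem.Set.inter aPos bShift ≠ [] then "true" else "false"

-- ===== PRECONDITION & SPEC =====
def Spec_ABCheck (str : String) (out : String) : Prop := out = ABCheck_alt str
instance (str : String) (out : String) : Decidable (Spec_ABCheck str out) := by unfold Spec_ABCheck; infer_instance

-- ===== CLAIM (what is proved, stated in full; the proofs are below) =====
def Claim_equal_ABCheck : Prop := ∀ (str : String), Dom_ABCheck str → Spec_ABCheck str (ABCheck str)

-- ===== LEMMAS AND PROOFS =====

-- zeta-reduced form of the B port
theorem ABCheck_alt_eq (str : String) :
    ABCheck_alt str =
      (if PySem.Set.inter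
          (PySem.Set.ofList (((PySem.List.enumerate str.toList 0).filter (fun p => p.2 == 'a')).map (fun p => p.1)))
          (PySem.Set.ofList (((PySem.List.enumerate str.toList 0).filter (fun p => p.2 == 'b')).map (fun p => p.1 - 4)))
          ≠ [] then "true" else "false") := rfl

-- the common characterisation: some index j carries 'a' with 'b' four places later
def HasAB (str : String) (k : Nat) : Prop :=
  ∃ j : Nat, k ≤ j ∧ j + 4 < str.toList.length ∧
    str.toList[j]? = some 'a' ∧ str.toList[j + 4]? = some 'b'

theorem go_true_iff (str : String) (n k : Nat)
    (hn : str.toList.length - k ≤ n) :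
    (ABCheckGo str (PySem.Str.len str) (k : Int) = "true") ↔ HasAB str k := by
  have hL : str.toList.length = str.length := String.length_toList
  induction n generalizing k with
  | zero =>
    rw [ABCheckGo, dif_neg (by simp only [PySem.Str.len_eq]; omega)]
    constructor
    · intro h; exact absurd h (by decide)
    · rintro ⟨j, hkj, hj, -⟩; omega
  | succ m ih =>
    rw [ABCheckGo]
    by_cases h : k + 4 < str.toList.length
    · rw [dif_pos (by simp only [PySem.Str.len_eq]; omega)]
      have h1 : PySem.Str.pyGet? str (k : Int) = str.toList[k]? := by
        rw [PySem.Str.pyGet?_natCast]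
      have h2 : PySem.Str.pyGet? str ((k : Int) + 4) = str.toList[k + 4]? := by
        rw [show ((k : Int) + 4) = ((k + 4 : Nat) : Int) from by push_cast; ring,
          PySem.Str.pyGet?_natCast]
      by_cases hab : str.toList[k]? = some 'a' ∧ str.toList[k + 4]? = some 'b'
      · rw [if_pos (by rw [h1, h2]; exact hab)]
        exact ⟨fun _ => ⟨k, le_refl _, h, hab.1, hab.2⟩, fun _ => rfl⟩
      · rw [if_neg (by rw [h1, h2]; exact hab)]
        have ih' := ih (k + 1) (by omega)
        rw [show ((k : Int) + 1) = ((k + 1 : Nat) : Int) from by push_cast; ring]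
        refine ih'.trans ⟨?_, ?_⟩
        · rintro ⟨j, hkj, hj, ha, hb⟩; exact ⟨j, by omega, hj, ha, hb⟩
        · rintro ⟨j, hkj, hj, ha, hb⟩
          refine ⟨j, ?_, hj, ha, hb⟩
          rcases Nat.eq_or_lt_of_le hkj with rfl | hlt
          · exact absurd ⟨ha, hb⟩ hab
          · omega
    · rw [dif_neg (by simp only [PySem.Str.len_eq]; omega)]
      constructor
      · intro hcontra; exact absurd hcontra (by decide)
      · rintro ⟨j, hkj, hj, -⟩; omega

theorem go_vals (str : String) (l i : Int) :
    ABCheckGo str l i = "true" ∨ ABCheckGo str l i = "false" := by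
  rw [ABCheckGo]
  split
  · split
    · exact Or.inl rfl
    · exact go_vals str l (i + 1)
  · exact Or.inr rfl
termination_by (l - 4 - i).toNat
decreasing_by omega

theorem alt_true_iff (str : String) :
    (ABCheck_alt str = "true") ↔ HasAB str 0 := by
  rw [ABCheck_alt_eq]
  split
  · rename_i hne
    simp only [true_iff]
    rcases List.exists_mem_of_ne_nil _ hne with ⟨x, hx⟩
    rw [PySem.Set.mem_inter] at hx
    obtain ⟨hxa, hxb⟩ := hx
    rw [PySem.Set.mem_ofList] at hxa hxb
    simp only [List.mem_map, List.mem_filter, PySem.List.mem_enumerate_iff] at hxa hxb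
    obtain ⟨⟨ia, ca⟩, ⟨⟨j, hj, hpe⟩, hca⟩, hfst⟩ := hxa
    obtain ⟨⟨ib, cb⟩, ⟨⟨j', hj', hpe'⟩, hcb⟩, hfst'⟩ := hxb
    obtain ⟨rfl, rfl⟩ := Prod.mk.injEq .. ▸ hpe
    obtain ⟨rfl, rfl⟩ := Prod.mk.injEq .. ▸ hpe'
    simp only at hfst hfst' hca hcb
    have hj4 : j' = j + 4 := by omega
    subst hj4
    exact ⟨j, Nat.zero_le _, hj', by
        rw [List.getElem?_eq_getElem hj]; simpa using hca, by
        rw [List.getElem?_eq_getElem hj']; simpa using hcb⟩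
  · rename_i hne
    refine ⟨fun h => absurd h (by decide), fun hP => ?_⟩
    exfalso
    obtain ⟨j, -, hj, ha, hb⟩ := hP
    apply hne
    have hja : str.toList[j]'(by omega) = 'a' := by
      have := List.getElem?_eq_getElem (l := str.toList) (i := j) (by omega)
      rw [this] at ha; exact Option.some.inj ha
    have hjb : str.toList[j + 4]'(by omega) = 'b' := by
      have := List.getElem?_eq_getElem (l := str.toList) (i := j + 4) (by omega)
      rw [this] at hb; exact Option.some.inj hb
    intro hempty
    have hmem : ((0 : Int) + j) ∈ PySem.Set.inter
        (PySem.Set.ofList (((PySem.List.enumerate str.toList 0).filter (fun p => p.2 == 'a')).map (fun p => p.1)))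
        (PySem.Set.ofList (((PySem.List.enumerate str.toList 0).filter (fun p => p.2 == 'b')).map (fun p => p.1 - 4))) := by
      rw [PySem.Set.mem_inter, PySem.Set.mem_ofList, PySem.Set.mem_ofList]
      constructor
      · exact List.mem_map.mpr ⟨((0 : Int) + j, 'a'),
          List.mem_filter.mpr ⟨(PySem.List.mem_enumerate_iff _ _ _).mpr ⟨j, by omega, by rw [hja]⟩, by simp⟩, rfl⟩
      · refine List.mem_map.mpr ⟨((0 : Int) + ((j + 4 : Nat) : Int), 'b'),
          List.mem_filter.mpr ⟨(PySem.List.mem_enumerate_iff _ _ _).mpr ⟨j + 4, by omega, by rw [hjb]⟩, by simp⟩, ?_⟩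
        push_cast; ring
    rw [hempty] at hmem
    exact absurd hmem (List.not_mem_nil)

-- ===== VERDICT (by name: the statement is the Claim_ definition above) =====
theorem ABCheck_spec : Claim_equal_ABCheck := by
  intro str _
  unfold Spec_ABCheck ABCheck
  have hgo := go_true_iff str str.toList.length 0 (by omega)
  simp only [Nat.cast_zero] at hgo
  have halt := alt_true_iff str
  by_cases hP : HasAB str 0
  · rw [hgo.mpr hP, halt.mpr hP]
  · rcases go_vals str (PySem.Str.len str) 0 with hv | hv
    · exact absurd (hgo.mp hv) hP
    · rw [hv]
      rw [ABCheck_alt_eq] at halt ⊢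
      split at halt
      · exact absurd (halt.mp rfl) hP
      · rename_i hcond
        rw [if_neg hcond]
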